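-- pv_equiv track=rewrite | github.com/park9707/Algorithm | programmers/서버 증설 횟수/서버 증설 횟수.py | solution
-- ===== SOURCE A (Python) =====
-- from collections import deque
--
-- def solution(players, m, k):
--     server = deque()
--     ans = 0
--     for i, n in enumerate(players):
--         if n == 0:
--             continue
--         while server and server[0] <= i:
--             server.popleft()
--
--         s = n // m
--         if len(server) < s:
--             ans += (s - len(server))
--             [server.append(i + k) for _ in range(s - len(server))]
--     return ans
-- ===== SOURCE B (Python) =====
-- def solution(players, m, k):
--     # Arithmetic reformulation: no server container at all. The number of servers
--     # active at hour i is the number added during the last k hours, so with a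
--     # prefix-sum table P of additions, added[i] = max(0, need[i] - (P[i] - P[lo]))
--     # and the answer is P[-1].
--     need = [n // m if n != 0 else 0 for n in players]
--     pref = [0]
--     for i, s in enumerate(need):
--         lo = min(max(i - k + 1, 0), i)
--         active = pref[i] - pref[lo]
--         pref.append(pref[i] + max(0, s - active))
--     return pref[-1]
-- ===== Notes on version B (the rewrite author's own statement) =====
-- stated objective: alternative
-- what changed: B keeps no server container at all: it precomputes the per-hour needs and runs one arithmetic pass over a prefix-sum table of additions, reading the active-server count as a window difference P[i]-P[lo] and returning P[-1], instead of A's deque of per-server expiry entries that is popped and appended element by element.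
import Mathlib
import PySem

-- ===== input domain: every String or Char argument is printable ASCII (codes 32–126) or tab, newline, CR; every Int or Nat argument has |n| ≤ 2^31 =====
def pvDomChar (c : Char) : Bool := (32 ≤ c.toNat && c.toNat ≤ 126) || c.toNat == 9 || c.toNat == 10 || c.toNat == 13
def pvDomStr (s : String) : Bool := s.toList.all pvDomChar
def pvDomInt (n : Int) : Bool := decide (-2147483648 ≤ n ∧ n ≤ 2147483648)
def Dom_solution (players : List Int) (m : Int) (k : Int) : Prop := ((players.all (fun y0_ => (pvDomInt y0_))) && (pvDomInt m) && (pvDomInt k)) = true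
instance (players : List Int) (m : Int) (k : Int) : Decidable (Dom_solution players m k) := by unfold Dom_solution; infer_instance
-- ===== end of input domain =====

-- B drops A's deque of per-server expiry entries entirely: it computes the per-hour
-- needs, then one arithmetic pass over a prefix-sum table of additions (active servers
-- at hour i = P[i] - P[lo], a window difference), returning P[-1] (objective: alternative).

-- ===== PORT A =====
-- while server and server[0] <= i: server.popleft()
def popA (i : Int) : List Int → List Int
  | [] => []
  | x :: xs => if x ≤ i then popA i xs else x :: xs

-- the for-loop over enumerate(players): state (server, ans), i the current index
def loopA (m k : Int) : Int → List Int → List Int → Int → Int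
  | _, [], _, ans => ans
  | i, n :: rest, server, ans =>
    if n = 0 then loopA m k (i + 1) rest server ans
    else
      let server1 := popA i server
      let s := PySem.Int.floordiv n m
      if (server1.length : Int) < s then
        loopA m k (i + 1) rest
          (server1 ++ List.replicate (s - (server1.length : Int)).toNat (i + k))
          (ans + (s - (server1.length : Int)))
      else loopA m k (i + 1) rest server1 ans

def solution (players : List Int) (m : Int) (k : Int) : Int :=
  loopA m k 0 players [] 0

-- ===== PORT B =====
-- for i, s in enumerate(need): pref.append(pref[i] + max(0, s - (pref[i] - pref[lo])))
def buildB (k : Int) : Int → List Int → List Int → List Int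
  | _, [], pref => pref
  | i, s :: rest, pref =>
    let lo := min (max (i - k + 1) 0) i
    let pi := (PySem.List.pyGet? pref i).getD 0
    let active := pi - (PySem.List.pyGet? pref lo).getD 0
    buildB k (i + 1) rest (pref ++ [pi + max 0 (s - active)])

def solution_alt (players : List Int) (m : Int) (k : Int) : Int :=
  let need := players.map (fun n => if n = 0 then (0 : Int) else PySem.Int.floordiv n m)
  let pref := buildB k 0 need [0]
  (PySem.List.pyGet? pref (-1)).getD 0

-- ===== PRECONDITION & SPEC =====
-- Python raises ZeroDivisionError exactly when m = 0 and some player count is nonzero.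
def Pre_solution (players : List Int) (m : Int) (k : Int) : Prop :=
  m ≠ 0 ∨ ∀ n ∈ players, n = 0
instance (players : List Int) (m : Int) (k : Int) : Decidable (Pre_solution players m k) := by
  unfold Pre_solution; infer_instance

def pvWitness_solution : List Int × Int × Int := ([5, 3, 0, 2], 2, 3)

def Spec_solution (players : List Int) (m : Int) (k : Int) (out : Int) : Prop := out = solution_alt players m k
instance (players : List Int) (m : Int) (k : Int) (out : Int) : Decidable (Spec_solution players m k out) := by unfold Spec_solution; infer_instance

-- ===== CLAIM (what is proved, stated in full; the proofs are below) =====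
def Claim_equal_solution : Prop := ∀ (players : List Int) (m : Int) (k : Int), Dom_solution players m k → Pre_solution players m k → Spec_solution players m k (solution players m k)

-- ===== LEMMAS AND PROOFS =====

-- Proof-side intermediate: A's deque compressed into (expiry, count) batches.
def popB (i : Int) : List (Int × Int) → Int → List (Int × Int) × Int
  | [], active => ([], active)
  | (e, c) :: bs, active =>
    if e ≤ i then popB i bs (active - c) else ((e, c) :: bs, active)

def loopB (m k : Int) : Int → List Int → List (Int × Int) → Int → Int → Int
  | _, [], _, _, ans => ans
  | i, n :: rest, batches, active, ans =>
    if n = 0 then loopB m k (i + 1) rest batches active ans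
    else
      let p := popB i batches active
      let s := PySem.Int.floordiv n m
      if p.2 < s then
        loopB m k (i + 1) rest (p.1 ++ [(i + k, s - p.2)]) s (ans + (s - p.2))
      else loopB m k (i + 1) rest p.1 p.2 ans

-- ---- step 1: loopA = loopB ----

def flat (bs : List (Int × Int)) : List Int :=
  bs.flatMap (fun b => List.replicate b.2.toNat b.1)

theorem flat_cons (e c : Int) (bs : List (Int × Int)) :
    flat ((e, c) :: bs) = List.replicate c.toNat e ++ flat bs := rfl

theorem flat_append (bs cs : List (Int × Int)) :
    flat (bs ++ cs) = flat bs ++ flat cs := by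
  simp [flat]

theorem popA_replicate_le (i e : Int) (h : e ≤ i) (n : Nat) (l : List Int) :
    popA i (List.replicate n e ++ l) = popA i l := by
  induction n with
  | zero => simp
  | succ n ih => simp [List.replicate_succ, popA, h, ih]

theorem pop_eq (i : Int) (bs : List (Int × Int)) (active : Int)
    (hpos : ∀ b ∈ bs, 0 < b.2)
    (ha : active = ((flat bs).length : Int)) :
    popA i (flat bs) = flat (popB i bs active).1 ∧
      (popB i bs active).2 = (((flat (popB i bs active).1).length : Int)) := by
  induction bs generalizing active with
  | nil => simpa [popA, popB, flat] using ha
  | cons b bs ih =>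
    obtain ⟨e, c⟩ := b
    have hc : 0 < c := hpos (e, c) (by simp)
    by_cases he : e ≤ i
    · have h1 := ih (active - c) (fun b hb => hpos b (by simp [hb]))
        (by simp [flat_cons] at ha; omega)
      simpa [popB, he, flat_cons, popA_replicate_le i e he] using h1
    · have hhead : flat ((e, c) :: bs) = e :: (List.replicate (c.toNat - 1) e ++ flat bs) := by
        rw [flat_cons]
        have : c.toNat = (c.toNat - 1) + 1 := by omega
        rw [this, List.replicate_succ]
        simp
      constructor
      · rw [hhead]; simp [popA, popB, he, ← hhead]
      · simpa [popB, he] using ha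

theorem popB_suffix (i : Int) (bs : List (Int × Int)) :
    ∀ active : Int, ∃ pre, bs = pre ++ (popB i bs active).1 := by
  induction bs with
  | nil => exact fun _ => ⟨[], by simp [popB]⟩
  | cons b bs ih =>
    intro active
    obtain ⟨e, c⟩ := b
    by_cases he : e ≤ i
    · obtain ⟨pre, hpre⟩ := ih (active - c)
      exact ⟨(e, c) :: pre, by simp [popB, he, ← hpre]⟩
    · exact ⟨[], by simp [popB, he]⟩

theorem loop_eq (m k : Int) (rest : List Int) (i : Int) (server : List Int)
    (bs : List (Int × Int)) (active ans : Int)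
    (hpos : ∀ b ∈ bs, 0 < b.2)
    (hs : server = flat bs)
    (ha : active = ((server.length : Int))) :
    loopA m k i rest server ans = loopB m k i rest bs active ans := by
  induction rest generalizing i server bs active ans with
  | nil => simp [loopA, loopB]
  | cons n rest ih =>
    by_cases hn : n = 0
    · subst hn
      simp only [loopA, loopB, if_true]
      exact ih (i + 1) server bs active ans hpos hs ha
    · have hp := pop_eq i bs active hpos (by rw [ha, hs])
      subst hs
      simp only [loopA, loopB, if_neg hn]
      set s := PySem.Int.floordiv n m with hsdef
      rcases hp with ⟨hp1, hp2⟩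
      have hsurv : ∀ b ∈ (popB i bs active).1, 0 < b.2 := by
        intro b hb
        obtain ⟨pre, hpre⟩ := popB_suffix i bs active
        exact hpos b (by rw [hpre]; exact List.mem_append_right _ hb)
      rw [hp1, ← hp2]
      by_cases hlt : (popB i bs active).2 < s
      · simp only [if_pos hlt]
        apply ih
        · intro b hb
          rcases List.mem_append.1 hb with h | h
          · exact hsurv b h
          · simp at h
            rw [h]
            simp only
            omega
        · rw [flat_append]
          simp [flat]
        · simp [List.length_append, List.length_replicate]
          omega
      · simp only [if_neg hlt]
        exact ih _ _ _ _ _ hsurv rfl hp2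

-- ---- step 2: loopB = buildB ----

def dseq (pref : List Int) (j : Nat) : Int := pref.getD (j + 1) 0 - pref.getD j 0

def blist (k : Int) (pref : List Int) (lo N : Nat) : List (Int × Int) :=
  (List.range N).filterMap (fun j =>
    if lo ≤ j ∧ 0 < dseq pref j then some (((j : Int) + k, dseq pref j)) else none)

def sumC (l : List (Int × Int)) : Int := (l.map (·.2)).sum

theorem sumC_append (l l' : List (Int × Int)) : sumC (l ++ l') = sumC l + sumC l' := by
  simp [sumC]

theorem blist_succ (k : Int) (pref : List Int) (lo N : Nat) :
    blist k pref lo (N + 1) =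
      blist k pref lo N ++
        (if lo ≤ N ∧ 0 < dseq pref N then [(((N : Int) + k, dseq pref N))] else []) := by
  simp only [blist, List.range_succ, List.filterMap_append, List.filterMap_cons,
    List.filterMap_nil]
  split_ifs <;> rfl

theorem dseq_append (pref : List Int) (x : Int) (j : Nat) (h : j + 1 < pref.length) :
    dseq (pref ++ [x]) j = dseq pref j := by
  unfold dseq
  rw [List.getD_append _ _ _ _ (by omega), List.getD_append _ _ _ _ (by omega)]

theorem blist_append (k : Int) (pref : List Int) (x : Int) (lo N : Nat)
    (h : N < pref.length) :
    blist k (pref ++ [x]) lo N = blist k pref lo N := by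
  unfold blist
  apply List.filterMap_congr
  intro j hj
  rw [List.mem_range] at hj
  rw [dseq_append pref x j (by omega)]

theorem mem_blist (k : Int) (pref : List Int) (lo N : Nat) (b : Int × Int)
    (hb : b ∈ blist k pref lo N) : ∃ j < N, b.1 = (j : Int) + k := by
  unfold blist at hb
  obtain ⟨j, hj, hfb⟩ := List.mem_filterMap.1 hb
  rw [List.mem_range] at hj
  split_ifs at hfb with h
  exact ⟨j, hj, by cases hfb; rfl⟩

theorem blist_sorted (k : Int) (pref : List Int) (lo N : Nat) :
    (blist k pref lo N).Pairwise (fun a b => a.1 ≤ b.1) := by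
  induction N with
  | zero => simp [blist]
  | succ N ih =>
    rw [blist_succ]
    apply List.pairwise_append.2
    refine ⟨ih, by split_ifs <;> simp, ?_⟩
    intro a ha b hb
    obtain ⟨j, hj, hj2⟩ := mem_blist k pref lo N a ha
    split_ifs at hb with h
    · simp at hb
      rw [hb, hj2]
      simp only
      omega
    · cases hb

theorem popB_sumC (i : Int) (l : List (Int × Int))
    (hsort : l.Pairwise (fun a b => a.1 ≤ b.1)) :
    popB i l (sumC l) = (l.filter (fun b => decide (i < b.1)),
      sumC (l.filter (fun b => decide (i < b.1)))) := by
  induction l with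
  | nil => simp [popB, sumC]
  | cons b l ih =>
    obtain ⟨e, c⟩ := b
    rw [List.pairwise_cons] at hsort
    by_cases he : e ≤ i
    · have : sumC ((e, c) :: l) - c = sumC l := by simp [sumC]
      simp only [popB, if_pos he, this, ih hsort.2]
      have : ¬ (i < e) := by omega
      simp [this]
    · have hall : ∀ b ∈ l, i < b.1 := by
        intro b hb
        have := hsort.1 b hb
        omega
      have : l.filter (fun b => decide (i < b.1)) = l :=
        List.filter_eq_self.2 (fun b hb => by simpa using hall b hb)
      simp [popB, he, this, show i < e by omega]

theorem blist_filter (k : Int) (pref : List Int) (lo N : Nat) :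
    (blist k pref lo N).filter (fun b => decide ((N : Int) < b.1)) =
      blist k pref (max lo ((N : Int) - k + 1).toNat) N := by
  unfold blist
  rw [List.filter_filterMap]
  apply List.filterMap_congr
  intro j hj
  rw [List.mem_range] at hj
  by_cases h : lo ≤ j ∧ 0 < dseq pref j
  · simp only [if_pos h, Option.filter_some]
    by_cases h2 : (N : Int) < (j : Int) + k
    · have : max lo ((N : Int) - k + 1).toNat ≤ j ∧ 0 < dseq pref j :=
        ⟨by omega, h.2⟩
      simp [h2, this]
    · have : ¬ (max lo ((N : Int) - k + 1).toNat ≤ j ∧ 0 < dseq pref j) := by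
        intro hc
        omega
      simp only [if_neg this]
      simp [h2]
  · rw [if_neg h]
    have h2 : ¬ (max lo ((N : Int) - k + 1).toNat ≤ j ∧ 0 < dseq pref j) := by
      intro hc
      exact h ⟨by omega, hc.2⟩
    rw [if_neg h2]
    rfl

theorem blist_min (k : Int) (pref : List Int) (lo N : Nat) :
    blist k pref lo N = blist k pref (min lo N) N := by
  unfold blist
  apply List.filterMap_congr
  intro j hj
  rw [List.mem_range] at hj
  by_cases h : lo ≤ j
  · simp [h, show min lo N ≤ j by omega]
  · have h2 : ¬ (min lo N ≤ j) := by omega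
    simp [h, h2]

theorem telescope (pref : List Int) (x : Nat) :
    ∀ N : Nat, x ≤ N →
    pref.getD N 0 - pref.getD x 0 =
      ((List.range' x (N - x)).map (dseq pref)).sum := by
  intro N
  induction N with
  | zero => intro h; interval_cases x; simp
  | succ N ih =>
    intro h
    by_cases hx : x = N + 1
    · subst hx; simp
    · have hxN : x ≤ N := by omega
      have h1 : N + 1 - x = (N - x) + 1 := by omega
      have h2 : x + (N - x) = N := by omega
      rw [h1, List.range'_1_concat, List.map_append, List.sum_append, h2, ← ih hxN]
      simp [dseq]

theorem sum_range'_shift (pref : List Int) (x y N : Nat)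
    (hxy : x ≤ y) (hyN : y ≤ N)
    (hz : ∀ j, x ≤ j → j < y → dseq pref j = 0) :
    ((List.range' x (N - x)).map (dseq pref)).sum =
      ((List.range' y (N - y)).map (dseq pref)).sum := by
  rw [show N - x = (y - x) + (N - y) by omega, ← List.range'_append_1,
    show x + (y - x) = y by omega, List.map_append, List.sum_append]
  have : ((List.range' x (y - x)).map (dseq pref)).sum = 0 := by
    apply List.sum_eq_zero
    intro v hv
    obtain ⟨j, hj, hjv⟩ := List.mem_map.1 hv
    rw [List.mem_range'_1] at hj
    rw [← hjv]
    exact hz j hj.1 (by omega)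
  rw [this, zero_add]

theorem sumC_blist (k : Int) (pref : List Int) (lo N : Nat)
    (hd : ∀ j, j < N → 0 ≤ dseq pref j) :
    sumC (blist k pref lo N) = ((List.range' lo (N - lo)).map (dseq pref)).sum := by
  induction N with
  | zero => simp [blist, sumC]
  | succ N ih =>
    have ih := ih (fun j hj => hd j (by omega))
    rw [blist_succ, sumC_append, ih]
    by_cases hlo : lo ≤ N
    · have h1 : N + 1 - lo = (N - lo) + 1 := by omega
      have h2 : lo + (N - lo) = N := by omega
      rw [h1, List.range'_1_concat, List.map_append, List.sum_append, h2]
      by_cases hdN : 0 < dseq pref N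
      · simp [hlo, hdN, sumC]
      · have : dseq pref N = 0 := le_antisymm (by omega) (hd N (by omega))
        simp [sumC, this]
    · have h2 : N - lo = 0 := by omega
      have h1 : N + 1 - lo = 0 := by omega
      have : ¬ (lo ≤ N ∧ 0 < dseq pref N) := by omega
      simp [h1, h2, this, sumC]

-- getD / pyGet? bridges
theorem pyg (l : List Int) (i : Int) (h0 : 0 ≤ i) (_h1 : i < (l.length : Int)) :
    (PySem.List.pyGet? l i).getD 0 = l.getD i.toNat 0 := by
  rw [PySem.List.pyGet?_of_nonneg l h0, List.getD_eq_getElem?_getD]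

theorem getD_snoc_len (l : List Int) (x : Int) : (l ++ [x]).getD l.length 0 = x := by
  simp [List.getD_eq_getElem?_getD]

theorem dseq_last (pref : List Int) (x : Int) (N : Nat) (hlen : pref.length = N + 1) :
    dseq (pref ++ [x]) N = x - pref.getD N 0 := by
  unfold dseq
  rw [show N + 1 = pref.length by omega]
  rw [getD_snoc_len, List.getD_append _ _ _ _ (by omega)]

theorem last_getD (pref : List Int) (N : Nat) (hlen : pref.length = N + 1) :
    (PySem.List.pyGet? pref (-1)).getD 0 = pref.getD N 0 := by
  rw [PySem.List.pyGet?_neg_one, List.getLast?_eq_getElem?, List.getD_eq_getElem?_getD, hlen]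
  simp

theorem loopB_eq_buildB (m k : Int) :
    ∀ (rest : List Int) (N : Nat) (pref : List Int) (lo : Nat)
      (batches : List (Int × Int)) (active ans : Int),
    pref.length = N + 1 →
    lo ≤ N →
    (∀ j, j < N → 0 ≤ dseq pref j) →
    batches = blist k pref lo N →
    (∀ j, j < lo → 0 < dseq pref j → (j : Int) + k ≤ (N : Int)) →
    active = sumC batches →
    ans = pref.getD N 0 →
    loopB m k (N : Int) rest batches active ans =
      (PySem.List.pyGet?
        (buildB k (N : Int)
          (rest.map (fun n => if n = 0 then (0 : Int) else PySem.Int.floordiv n m)) pref)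
        (-1)).getD 0 := by
  intro rest
  induction rest with
  | nil =>
    intro N pref lo batches active ans hlen hlo hd hb hprop hact hans
    simp only [loopB, List.map_nil, buildB]
    rw [last_getD pref N hlen, hans]
  | cons n rest ih =>
    intro N pref lo batches active ans hlen hlo hd hb hprop hact hans
    -- common abbreviations
    set T : Nat := (((N : Int)) - k + 1).toNat with hT
    set lo2 : Nat := max lo T with hlo2
    set lo2' : Nat := min lo2 N with hlo2'
    set LB : Nat := min T N with hLB
    -- the B-side step values
    have hloB : (min (max ((N : Int) - k + 1) 0) (N : Int)) = (LB : Int) := by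
      simp only [hLB, hT]
      omega
    have hgetN : (PySem.List.pyGet? pref ((N : Int))).getD 0 = pref.getD N 0 := by
      rw [pyg pref _ (by omega) (by omega)]
      simp
    have hgetLB : (PySem.List.pyGet? pref ((LB : Int))).getD 0 = pref.getD LB 0 := by
      rw [pyg pref _ (by omega) (by omega)]
      simp
    -- active after the pop equals B's window difference
    have hkept : (blist k pref lo N).filter (fun b => decide ((N : Int) < b.1)) =
        blist k pref lo2' N := by
      rw [blist_filter, ← hlo2, blist_min]
    have hpop : popB (N : Int) batches active =
        (blist k pref lo2' N, sumC (blist k pref lo2' N)) := by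
      rw [hb, hact, hb, popB_sumC _ _ (blist_sorted k pref lo N), hkept]
    have hzero : ∀ j, LB ≤ j → j < lo2' → dseq pref j = 0 := by
      intro j hj1 hj2
      have hjN : j < N := by omega
      have hjT : T ≤ j := by omega
      have hjlo : j < lo := by omega
      have hjk : (N : Int) < (j : Int) + k := by omega
      have := hprop j hjlo
      have := hd j hjN
      omega
    have hactiveB : sumC (blist k pref lo2' N) = pref.getD N 0 - pref.getD LB 0 := by
      rw [sumC_blist k pref lo2' N hd, telescope pref LB N (by omega),
        sum_range'_shift pref LB lo2' N (by omega) (by omega) hzero]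
    have hactnn : 0 ≤ pref.getD N 0 - pref.getD LB 0 := by
      rw [telescope pref LB N (by omega)]
      apply List.sum_nonneg
      intro v hv
      obtain ⟨j, hj, hjv⟩ := List.mem_map.1 hv
      rw [List.mem_range'_1] at hj
      rw [← hjv]
      exact hd j (by omega)
    -- invariant pieces shared by all three continuation cases, for pref' = pref ++ [x]
    have hd' : ∀ x : Int, pref.getD N 0 ≤ x → ∀ j, j < N + 1 → 0 ≤ dseq (pref ++ [x]) j := by
      intro x hx j hj
      by_cases hjN : j < N
      · rw [dseq_append pref x j (by omega)]
        exact hd j hjN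
      · have hj' : j = N := by omega
        rw [hj', dseq_last pref x N hlen]
        omega
    have hprop2' : ∀ x : Int, ∀ j, j < lo2' → 0 < dseq (pref ++ [x]) j →
        (j : Int) + k ≤ ((N + 1 : Nat) : Int) := by
      intro x j hj hdj
      have hjN : j < N := by omega
      rw [dseq_append pref x j (by omega)] at hdj
      by_cases hjlo : j < lo
      · have := hprop j hjlo hdj
        push_cast
        omega
      · have hjT : j < T := by omega
        push_cast
        omega
    by_cases hn : n = 0
    · -- A skips; B appends an unchanged prefix value
      subst hn
      simp only [loopB, List.map_cons, buildB, reduceIte]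
      rw [hgetN, hloB, hgetLB]
      have hmax : max 0 ((0 : Int) - (pref.getD N 0 - pref.getD LB 0)) = 0 := by omega
      rw [hmax]
      have hstep : ((N : Int)) + 1 = (((N + 1 : Nat)) : Int) := by push_cast; ring
      rw [hstep]
      apply ih (N + 1) (pref ++ [pref.getD N 0 + 0]) lo batches active ans
      · simp [hlen]
      · omega
      · simpa using hd' (pref.getD N 0 + 0) (by omega)
      · rw [hb, blist_succ]
        have hdN : dseq (pref ++ [pref.getD N 0 + 0]) N = 0 := by
          rw [dseq_last pref _ N hlen]; ring
        rw [hdN]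
        simp [blist_append k pref _ lo N (by omega)]
      · intro j hj hdj
        by_cases hjN : j < N
        · rw [dseq_append pref _ j (by omega)] at hdj
          have := hprop j hj hdj
          push_cast
          omega
        · omega
      · exact hact
      · rw [hans]
        have : pref.getD N 0 + 0 = pref.getD N 0 := by ring
        rw [this, show N + 1 = pref.length by omega, getD_snoc_len]
    · -- A pops and possibly adds; B appends the prefix value plus the same max
      simp only [loopB, List.map_cons, if_neg hn, buildB]
      rw [hgetN, hloB, hgetLB, hpop]
      set s : Int := PySem.Int.floordiv n m with hs
      have hstep : ((N : Int)) + 1 = (((N + 1 : Nat)) : Int) := by push_cast; ring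
      by_cases hlt : sumC (blist k pref lo2' N) < s
      · -- scale up: add = s - active servers
        simp only [if_pos hlt]
        have hmax : max 0 (s - (pref.getD N 0 - pref.getD LB 0)) =
            s - sumC (blist k pref lo2' N) := by
          rw [← hactiveB]; omega
        rw [hmax, hstep]
        set x : Int := pref.getD N 0 + (s - sumC (blist k pref lo2' N)) with hx
        apply ih (N + 1) (pref ++ [x]) lo2'
        · simp [hlen]
        · omega
        · exact hd' x (by rw [hx]; omega)
        · rw [blist_succ]
          have hdN : dseq (pref ++ [x]) N = s - sumC (blist k pref lo2' N) := by
            rw [dseq_last pref x N hlen, hx]; ring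
          rw [hdN]
          have hcond : lo2' ≤ N ∧ 0 < s - sumC (blist k pref lo2' N) := ⟨by omega, by omega⟩
          rw [if_pos hcond, blist_append k pref x lo2' N (by omega)]
        · exact hprop2' x
        · rw [sumC_append]
          simp [sumC]

        · rw [hans, hx, show N + 1 = pref.length by omega, getD_snoc_len]
      · -- enough servers already active
        simp only [if_neg hlt]
        have hmax : max 0 (s - (pref.getD N 0 - pref.getD LB 0)) = 0 := by
          rw [← hactiveB]; omega
        rw [hmax, hstep]
        apply ih (N + 1) (pref ++ [pref.getD N 0 + 0]) lo2'
        · simp [hlen]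
        · omega
        · simpa using hd' (pref.getD N 0 + 0) (by omega)
        · rw [blist_succ]
          have hdN : dseq (pref ++ [pref.getD N 0 + 0]) N = 0 := by
            rw [dseq_last pref _ N hlen]; ring
          rw [hdN]
          simp [blist_append k pref _ lo2' N (by omega)]
        · exact hprop2' _
        · rfl
        · rw [hans]
          have : pref.getD N 0 + 0 = pref.getD N 0 := by ring
          rw [this, show N + 1 = pref.length by omega, getD_snoc_len]

-- ===== VERDICT (by name: the statement is the Claim_ definition above) =====
theorem solution_spec : Claim_equal_solution := by
  intro players m k _ _
  unfold Spec_solution solution solution_alt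
  rw [loop_eq m k players 0 [] [] 0 0 (by simp) rfl rfl]
  exact loopB_eq_buildB m k players 0 [0] 0 [] 0 0 rfl (by omega) (by omega) (by simp [blist])
    (by omega) (by simp [sumC]) rfl
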